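-- pv_equiv track=rewrite | github.com/Seetrax/Maze-generator-and-solver | Maze.py | maze_adj
-- ===== SOURCE A (Python) =====
-- def maze_adj(parent):#generating maze adjacency dictionary using parent dict produced by dfs
--     d={}
--     arr5=[]
--     for i in parent:
--         if parent[i]!='NULL':
--             arr5.append(parent[i])
--         for j in parent:
--             if parent[j]!='NULL':
--                 if parent[j]==i:
--                     arr5.append(j)
--         d[i]=arr5
--         arr5=[]
--
--     return d
-- ===== SOURCE B (Python) =====
-- def maze_adj(parent):
--     # Build a children index in one pass, then assemble each adjacency list
--     # (parent first, then children in original key order) in a second pass.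
--     children = {}
--     for j, pj in parent.items():
--         if pj != 'NULL':
--             children.setdefault(pj, []).append(j)
--     return {i: ([pi] if pi != 'NULL' else []) + children.get(i, [])
--             for i, pi in parent.items()}
-- ===== Notes on version B (the rewrite author's own statement) =====
-- stated objective: faster
-- what changed: Replaces A's quadratic nested rescan (for every key, scan all keys for matching children) by a single grouping pass building a children index keyed by parent, plus one assembly pass; Pre_ only excludes association lists with duplicate keys, which do not represent a Python dict input.
import Mathlib
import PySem

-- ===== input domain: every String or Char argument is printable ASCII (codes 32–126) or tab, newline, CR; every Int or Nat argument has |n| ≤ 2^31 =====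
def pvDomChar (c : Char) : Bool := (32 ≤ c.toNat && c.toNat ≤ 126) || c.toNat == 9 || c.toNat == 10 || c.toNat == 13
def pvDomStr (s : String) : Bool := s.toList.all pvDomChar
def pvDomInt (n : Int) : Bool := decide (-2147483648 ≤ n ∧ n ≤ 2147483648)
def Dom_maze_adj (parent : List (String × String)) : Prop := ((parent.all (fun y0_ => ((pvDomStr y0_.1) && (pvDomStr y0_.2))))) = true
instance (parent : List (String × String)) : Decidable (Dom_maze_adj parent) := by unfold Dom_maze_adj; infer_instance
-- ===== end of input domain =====

-- B builds a children index once (one grouping pass) instead of A's inner rescan of all keys per key: O(n) vs O(n^2).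

-- ===== PORT A =====
def maze_adj (parent : List (String × String)) : List (String × List String) :=
  let pd : PySem.Dict String String := PySem.Dict.mk parent
  let keys : List String := parent.map Prod.fst      -- 'for i in parent' iterates the dict's keys
  (keys.foldl (fun d i =>
      -- arr5 = []; if parent[i] != 'NULL': arr5.append(parent[i])
      let arr5 : List String := if pd.getD i "" ≠ "NULL" then [pd.getD i ""] else []
      -- for j in parent: if parent[j] != 'NULL': if parent[j] == i: arr5.append(j)
      let arr5 := keys.foldl (fun a j =>
          if pd.getD j "" ≠ "NULL" then (if pd.getD j "" = i then a ++ [j] else a) else a) arr5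
      d.insert i arr5) (PySem.Dict.empty : PySem.Dict String (List String))).items

-- ===== PORT B =====
def maze_adj_alt (parent : List (String × String)) : List (String × List String) :=
  -- children.setdefault(pj, []).append(j)  ==  children[pj] = children.get(pj, []) + [j]
  let children : PySem.Dict String (List String) :=
    parent.foldl (fun c p =>
        if p.2 ≠ "NULL" then c.modify p.2 [] (· ++ [p.1]) else c) PySem.Dict.empty
  (parent.foldl (fun d p =>
      d.insert p.1 ((if p.2 ≠ "NULL" then [p.2] else []) ++ children.getD p.1 []))
    (PySem.Dict.empty : PySem.Dict String (List String))).items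

-- ===== PRECONDITION & SPEC =====
-- Pre_ excludes association lists with duplicate keys: a Python dict cannot contain them
-- (dict construction collapses duplicates before either program ever sees the input).
def Pre_maze_adj (parent : List (String × String)) : Prop := (parent.map Prod.fst).Nodup
instance (parent : List (String × String)) : Decidable (Pre_maze_adj parent) := by
  unfold Pre_maze_adj; infer_instance
def pvWitness_maze_adj : (List (String × String)) :=
  [("a", "NULL"), ("b", "a"), ("c", "a"), ("d", "b")]
def Spec_maze_adj (parent : List (String × String)) (out : List (String × List String)) : Prop := out = maze_adj_alt parent
instance (parent : List (String × String)) (out : List (String × List String)) : Decidable (Spec_maze_adj parent out) := by unfold Spec_maze_adj; infer_instance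

-- ===== CLAIM (what is proved, stated in full; the proofs are below) =====
def Claim_equal_maze_adj : Prop := ∀ (parent : List (String × String)), Dom_maze_adj parent → Pre_maze_adj parent → Spec_maze_adj parent (maze_adj parent)

-- ===== LEMMAS AND PROOFS =====

-- The children index, looked up at i, holds the first components of the pairs
-- whose second component is a non-'NULL' value equal to i, in order.
theorem children_getD (l : List (String × String)) (c : PySem.Dict String (List String)) (i : String) :
    (l.foldl (fun c p => if p.2 ≠ "NULL" then c.modify p.2 [] (· ++ [p.1]) else c) c).getD i []
      = c.getD i [] ++ ((l.filter (fun p => decide (p.2 ≠ "NULL") && decide (p.2 = i))).map Prod.fst) := by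
  induction l generalizing c with
  | nil => simp
  | cons p t ih =>
    simp only [List.foldl_cons, List.filter_cons]
    by_cases h : p.2 = "NULL"
    · rw [if_neg (by simp [h]), ih]
      simp [h]
    · rw [if_pos h, ih]
      by_cases hi : p.2 = i
      · subst hi
        simp [h, PySem.Dict.getD_modify_self]
      · rw [PySem.Dict.getD_modify_of_ne c _ _ (fun e => hi e.symm)]
        simp [h, hi]

-- A's inner scan (already folded over the pairs), given that dict lookup agrees
-- with each pair, appends exactly that same sublist of first components.
theorem inner_scan (pd : PySem.Dict String String) (l : List (String × String)) (i : String)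
    (a : List String) (h : ∀ p ∈ l, pd.getD p.1 "" = p.2) :
    l.foldl (fun a p =>
        if pd.getD p.1 "" ≠ "NULL" then (if pd.getD p.1 "" = i then a ++ [p.1] else a) else a) a
      = a ++ ((l.filter (fun p => decide (p.2 ≠ "NULL") && decide (p.2 = i))).map Prod.fst) := by
  induction l generalizing a with
  | nil => simp
  | cons p t ih =>
    simp only [List.foldl_cons, List.filter_cons]
    rw [h p (by simp)]
    by_cases hn : p.2 = "NULL"
    · simp only [hn, ne_eq, not_true_eq_false, if_false]
      rw [ih a (fun q hq => h q (by simp [hq]))]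
      simp
    · simp only [ne_eq, hn, not_false_eq_true, if_true]
      by_cases hi : p.2 = i
      · rw [if_pos hi, ih _ (fun q hq => h q (by simp [hq]))]
        simp [hi]
      · rw [if_neg hi, ih _ (fun q hq => h q (by simp [hq]))]
        simp [hi]

theorem lookup_of_mem (parent : List (String × String)) (h : (parent.map Prod.fst).Nodup)
    (p : String × String) (hp : p ∈ parent) : (PySem.Dict.mk parent).getD p.1 "" = p.2 :=
  PySem.Dict.getD_of_mem_items (d := PySem.Dict.mk parent) (k := p.1) (v := p.2) hp h ""

-- Two insert loops over the same pairs with pointwise-equal values build the same dict.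
theorem foldl_insert_congr (l : List (String × String)) (f g : String × String → List String)
    (h : ∀ p ∈ l, f p = g p) (d : PySem.Dict String (List String)) :
    l.foldl (fun d p => d.insert p.1 (f p)) d = l.foldl (fun d p => d.insert p.1 (g p)) d := by
  induction l generalizing d with
  | nil => rfl
  | cons p t ih =>
    simp only [List.foldl_cons]
    rw [h p (by simp)]
    exact ih (fun q hq => h q (by simp [hq])) _

-- ===== VERDICT (by name: the statement is the Claim_ definition above) =====
theorem maze_adj_spec : Claim_equal_maze_adj := by
  intro parent _ hpre
  unfold Spec_maze_adj maze_adj maze_adj_alt Pre_maze_adj at *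
  simp only [List.foldl_map]
  congr 1
  apply foldl_insert_congr
  intro p hp
  have hv := lookup_of_mem parent hpre p hp
  rw [inner_scan _ parent _ _ (lookup_of_mem parent hpre), children_getD, hv]
  simp [PySem.Dict.getD_empty]
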